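-- pv_equiv track=rewrite | github.com/tchtinku/Ace_Programming | Multidimensional_Arrays/MatrixFlipBit/BruteForce/MatrixFlipBit.py | count_flipped_bits
-- ===== SOURCE A (Python) =====
-- def count_flipped_bits(matrix):
--     """
--     Count the number of 1s in the same row or column as any 0 in the matrix.
--
--     Parameters:
--     matrix (list of lists): Input 2D binary matrix.
--
--     Returns:
--     int: Count of 1s to be flipped.
--     """
--     n = len(matrix)
--     count = 0
--
--     for i in range(n):  # Loop through rows
--         for j in range(n):     # Loop through columns
--             if matrix[i][j] == 0:
--                 # Check the ith row
--                 for k in range(n):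
--                     if matrix[i][k] == 1:
--                         count += 1
--                         matrix[i][k] = -1    # Mark as visited
--
--                 # Check for jth column
--                 for k in range(n):
--                     if matrix[k][j] == 1:
--                         count += 1
--                         matrix[k][j] = -1  # Mark as visited
--
--     return count
-- ===== SOURCE B (Python) =====
-- def count_flipped_bits(matrix):
--     """
--     Count the number of 1s in the same row or column as any 0 in the matrix.
--     (Does not mutate `matrix`, unlike the original.)
--     """
--     n = len(matrix)
--     row_zero = [any(matrix[i][j] == 0 for j in range(n)) for i in range(n)]
--     col_zero = [any(matrix[i][j] == 0 for i in range(n)) for j in range(n)]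
--     count = 0
--     for i in range(n):
--         for j in range(n):
--             if matrix[i][j] == 1 and (row_zero[i] or col_zero[j]):
--                 count += 1
--     return count
-- ===== Notes on version B (the rewrite author's own statement) =====
-- stated objective: alternative
-- what changed: Instead of rescanning (and mutating) the whole row and column each time a zero is found, B precomputes per-row and per-column has-a-zero flags once and counts qualifying 1s in a single pass, without mutating the input.
import Mathlib
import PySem

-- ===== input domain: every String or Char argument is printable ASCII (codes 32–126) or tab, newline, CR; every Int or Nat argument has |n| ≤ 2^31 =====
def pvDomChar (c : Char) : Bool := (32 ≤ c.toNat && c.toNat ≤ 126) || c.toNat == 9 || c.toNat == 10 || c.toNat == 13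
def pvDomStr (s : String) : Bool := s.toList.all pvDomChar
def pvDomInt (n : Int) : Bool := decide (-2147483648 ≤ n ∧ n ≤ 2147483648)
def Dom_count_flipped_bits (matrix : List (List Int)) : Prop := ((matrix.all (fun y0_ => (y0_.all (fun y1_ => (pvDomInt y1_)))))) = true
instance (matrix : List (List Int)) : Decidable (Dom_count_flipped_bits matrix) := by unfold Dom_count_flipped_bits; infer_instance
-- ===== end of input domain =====

-- B replaces A's per-zero rescans of the zero's whole row and column by precomputed per-row /
-- per-column zero flags and one counting pass; A mutates its argument (marks counted 1s as -1),
-- B does not — the equivalence proved here is about the RETURN value only.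

-- ===== PORT A =====
-- matrix[r][c] read (indices produced by range, always ≥ 0; Pre_ keeps them in range)
def getM (m : List (List Int)) (r c : Nat) : Int := (m.getD r []).getD c 0
-- matrix[r][c] = v  (in-place update; no-op out of range, unreachable under Pre_)
def setM (m : List (List Int)) (r c : Nat) (v : Int) : List (List Int) :=
  m.set r ((m.getD r []).set c v)

def count_flipped_bits (matrix : List (List Int)) : Int :=
  let n := matrix.length
  let final := (List.range n).foldl (fun s i =>
    (List.range n).foldl (fun s j =>
      if getM s.1 i j == 0 then
        let s1 := (List.range n).foldl (fun t k =>
          if getM t.1 i k == 1 then (setM t.1 i k (-1), t.2 + 1) else t) s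
        (List.range n).foldl (fun t k =>
          if getM t.1 k j == 1 then (setM t.1 k j (-1), t.2 + 1) else t) s1
      else s) s) (matrix, (0 : Int))
  final.2

-- ===== PORT B =====
def count_flipped_bits_alt (matrix : List (List Int)) : Int :=
  let n := matrix.length
  let rowZero := (List.range n).map (fun i => (List.range n).any (fun j => getM matrix i j == 0))
  let colZero := (List.range n).map (fun j => (List.range n).any (fun i => getM matrix i j == 0))
  (List.range n).foldl (fun count i =>
    (List.range n).foldl (fun count j =>
      if getM matrix i j == 1 && (rowZero.getD i false || colZero.getD j false) then count + 1
      else count) count) (0 : Int)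

-- ===== PRECONDITION & SPEC =====
-- Pre_ excludes exactly the inputs where Python A raises IndexError: some row shorter than len(matrix).
def Pre_count_flipped_bits (matrix : List (List Int)) : Prop :=
  ∀ row ∈ matrix, matrix.length ≤ row.length
instance (matrix : List (List Int)) : Decidable (Pre_count_flipped_bits matrix) := by
  unfold Pre_count_flipped_bits; infer_instance
def pvWitness_count_flipped_bits : List (List Int) := [[1, 0], [1, 1]]

def Spec_count_flipped_bits (matrix : List (List Int)) (out : Int) : Prop := out = count_flipped_bits_alt matrix
instance (matrix : List (List Int)) (out : Int) : Decidable (Spec_count_flipped_bits matrix out) := by unfold Spec_count_flipped_bits; infer_instance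

-- ===== CLAIM (what is proved, stated in full; the proofs are below) =====
def Claim_equal_count_flipped_bits : Prop := ∀ (matrix : List (List Int)), Dom_count_flipped_bits matrix → Pre_count_flipped_bits matrix → Spec_count_flipped_bits matrix (count_flipped_bits matrix)

-- ===== LEMMAS AND PROOFS =====

-- the cells (i,j), i<n, j<n, in A's visiting order
def cells (n : Nat) : List (Nat × Nat) :=
  (List.range n).flatMap (fun i => (List.range n).map (fun j => (i, j)))

-- "cell p of the ORIGINAL matrix is zero"
def zB (m : List (List Int)) (p : Nat × Nat) : Bool := getM m p.1 p.2 == 0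

-- "(r,c) was 1 originally and some already-processed cell p is a zero in its row or column"
def markedB (m : List (List Int)) (P : List (Nat × Nat)) (r c : Nat) : Bool :=
  getM m r c == 1 && P.any (fun p => zB m p && (p.1 == r || p.2 == c))

-- one mark-and-count step at position (a k, b k)
def passF (a b : Nat → Nat) (t : List (List Int) × Int) (k : Nat) : List (List Int) × Int :=
  if getM t.1 (a k) (b k) == 1 then (setM t.1 (a k) (b k) (-1), t.2 + 1) else t

-- one iteration of A's double loop
def stepF (n : Nat) (s : List (List Int) × Int) (q : Nat × Nat) : List (List Int) × Int :=
  if getM s.1 q.1 q.2 == 0 then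
    (List.range n).foldl (passF (fun k => k) (fun _ => q.2))
      ((List.range n).foldl (passF (fun _ => q.1) (fun k => k)) s)
  else s

-- loop invariant of A's main double loop after processing the cells in P
def MarkInv (m : List (List Int)) (n : Nat) (P : List (Nat × Nat)) (s : List (List Int) × Int) : Prop :=
  s.1.length = m.length ∧
  (∀ r, (s.1.getD r []).length = (m.getD r []).length) ∧
  (∀ r c, r < n → c < n → getM s.1 r c = if markedB m P r c then -1 else getM m r c) ∧
  s.2 = ((cells n).countP (fun q => markedB m P q.1 q.2) : Int)

lemma mem_cells {n : Nat} {q : Nat × Nat} : q ∈ cells n ↔ q.1 < n ∧ q.2 < n := by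
  obtain ⟨a, b⟩ := q
  simp [cells, List.mem_flatMap, List.mem_map, List.mem_range]

lemma length_setM (m : List (List Int)) (r c : Nat) (v : Int) :
    (setM m r c v).length = m.length := by simp [setM]

lemma rowlen_setM (m : List (List Int)) (r c : Nat) (v : Int) (r' : Nat) :
    ((setM m r c v).getD r' []).length = (m.getD r' []).length := by
  simp only [setM, List.getD_eq_getElem?_getD, List.getElem?_set]
  by_cases h : r = r'
  · subst h
    by_cases hr : r < m.length
    · simp [hr, ← List.getD_eq_getElem?_getD]
    · simp [hr]
  · simp [h]

lemma getM_setM (m : List (List Int)) (r c : Nat) (v : Int) (r' c' : Nat)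
    (hr : r < m.length) (hc : c < (m.getD r []).length) :
    getM (setM m r c v) r' c' = if r' = r ∧ c' = c then v else getM m r' c' := by
  by_cases h : r' = r
  · subst h
    have h1 : (m.set r' ((m.getD r' []).set c v))[r']? = some ((m.getD r' []).set c v) := by
      simp [List.getElem?_set, hr]
    have hc2 : c < (m[r']?.getD []).length := by
      simpa [List.getD_eq_getElem?_getD] using hc
    by_cases hcc : c' = c
    · subst hcc
      have hc3 : c' < (m[r']).length := by
        simpa [List.getElem?_eq_getElem hr] using hc2
      simp [getM, setM, List.getD_eq_getElem?_getD, h1, List.getElem?_set, hc2, hr, hc3]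
    · have h2 : ¬ (c = c') := fun hh => hcc hh.symm
      simp [getM, setM, List.getD_eq_getElem?_getD, h1, List.getElem?_set, h2, hcc, hr]
  · have h2 : ¬ (r = r') := fun hh => h hh.symm
    simp [getM, setM, List.getD_eq_getElem?_getD, List.getElem?_set, h2, h]

-- characterisation of one marking pass (row pass / column pass)
lemma pass_char (a b : Nat → Nat) : ∀ (ks : List Nat) (s : List (List Int) × Int),
    (∀ k ∈ ks, a k < s.1.length ∧ b k < (s.1.getD (a k) []).length) →
    ((ks.map (fun k => (a k, b k))).Nodup) →
    (ks.foldl (passF a b) s).1.length = s.1.length ∧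
    (∀ r, ((ks.foldl (passF a b) s).1.getD r []).length = (s.1.getD r []).length) ∧
    (∀ r c, getM (ks.foldl (passF a b) s).1 r c =
      if (ks.any (fun k => a k == r && b k == c)) && (getM s.1 r c == 1) then -1
      else getM s.1 r c) ∧
    (ks.foldl (passF a b) s).2 = s.2 + ((ks.countP (fun k => getM s.1 (a k) (b k) == 1) : Nat) : Int) := by
  intro ks
  induction ks with
  | nil => intro s _ _; simp
  | cons k₀ ks ih =>
    intro s hpos hinj
    have hb₀ := hpos k₀ (by simp)
    have hA : (passF a b s k₀).1.length = s.1.length ∧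
        (∀ r, (((passF a b s k₀).1.getD r []).length = (s.1.getD r []).length)) ∧
        (∀ r c, getM (passF a b s k₀).1 r c =
          if ((a k₀ == r && b k₀ == c) && (getM s.1 r c == 1)) then -1 else getM s.1 r c) ∧
        (passF a b s k₀).2 = s.2 + (if getM s.1 (a k₀) (b k₀) == 1 then 1 else 0) := by
      by_cases h1 : getM s.1 (a k₀) (b k₀) = 1
      · have hstep : passF a b s k₀ = (setM s.1 (a k₀) (b k₀) (-1), s.2 + 1) := by
          simp [passF, h1]
        refine ⟨by rw [hstep]; exact length_setM _ _ _ _,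
          fun r => by rw [hstep]; exact rowlen_setM _ _ _ _ _, ?_, by rw [hstep]; simp [h1]⟩
        intro r c
        rw [hstep]
        show getM (setM s.1 (a k₀) (b k₀) (-1)) r c = _
        rw [getM_setM s.1 (a k₀) (b k₀) (-1) r c hb₀.1 hb₀.2]
        by_cases hrr : r = a k₀ <;> by_cases hcc : c = b k₀
        · subst hrr; subst hcc; simp [h1]
        · have h2 : ¬ (b k₀ = c) := fun h => hcc h.symm
          simp [hrr, hcc, h2]
        · have h3 : ¬ (a k₀ = r) := fun h => hrr h.symm
          simp [hrr, hcc, h3]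
        · have h3 : ¬ (a k₀ = r) := fun h => hrr h.symm
          simp [hrr, hcc, h3]
      · have hs : passF a b s k₀ = s := by simp [passF, h1]
        refine ⟨by rw [hs], fun r => by rw [hs], ?_, by rw [hs]; simp [h1]⟩
        intro r c
        rw [hs]
        have hcond : (((a k₀ == r && b k₀ == c) && (getM s.1 r c == 1)) : Bool) = false := by
          by_cases hrr : a k₀ = r
          · by_cases hcc : b k₀ = c
            · subst hrr; subst hcc; simp [h1]
            · simp [hcc]
          · simp [hrr]
        rw [hcond]
        simp
    have hnd := List.nodup_cons.mp (show ((a k₀, b k₀) :: ks.map (fun k => (a k, b k))).Nodup from by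
      simpa only [List.map_cons] using hinj)
    have hnot : ∀ k ∈ ks, ¬(a k = a k₀ ∧ b k = b k₀) := by
      intro k hk hkk
      exact hnd.1 (List.mem_map.mpr ⟨k, hk, by rw [hkk.1, hkk.2]⟩)
    have hpos1 : ∀ k ∈ ks, a k < (passF a b s k₀).1.length ∧
        b k < ((passF a b s k₀).1.getD (a k) []).length := by
      intro k hk
      rw [hA.1, hA.2.1]
      exact hpos k (List.mem_cons_of_mem _ hk)
    have IH := ih (passF a b s k₀) hpos1 hnd.2
    have hfold : (k₀ :: ks).foldl (passF a b) s = ks.foldl (passF a b) (passF a b s k₀) := rfl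
    rw [hfold]
    refine ⟨IH.1.trans hA.1, fun r => (IH.2.1 r).trans (hA.2.1 r), ?_, ?_⟩
    · intro r c
      rw [IH.2.2.1 r c, hA.2.2.1 r c]
      by_cases hB1 : ((a k₀ == r && b k₀ == c) : Bool) = true <;>
        by_cases hV : getM s.1 r c = 1 <;>
          by_cases hB2 : (ks.any (fun k => a k == r && b k == c)) = true <;>
            simp [hB1, hV, hB2]
    · rw [IH.2.2.2, hA.2.2.2]
      have hcnt : ks.countP (fun k => getM (passF a b s k₀).1 (a k) (b k) == 1)
          = ks.countP (fun k => getM s.1 (a k) (b k) == 1) := by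
        apply List.countP_congr
        intro k hk
        rw [hA.2.2.1 (a k) (b k)]
        have := hnot k hk
        have hne : ((a k₀ == a k && b k₀ == b k) : Bool) = false := by
          by_cases h1 : a k₀ = a k <;> by_cases h2 : b k₀ = b k <;> simp_all <;>
            exact this ⟨h1.symm, h2.symm⟩
        simp [hne]
      rw [hcnt, List.countP_cons]
      by_cases hk0 : (getM s.1 (a k₀) (b k₀) == 1) = true <;> simp [hk0] <;> push_cast <;> ring

lemma countP_or (l : List (Nat × Nat)) (p q : Nat × Nat → Bool) :
    l.countP (fun x => p x || q x) = l.countP p + l.countP (fun x => !p x && q x) := by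
  induction l with
  | nil => simp
  | cons x l ih =>
    by_cases hp : p x <;> by_cases hq : q x <;>
      simp [List.countP_cons, hp, hq, ih] <;> omega

lemma countP_sum (p : Nat → Bool) : ∀ (l : List Nat),
    l.countP p = (l.map (fun x => if p x then 1 else 0)).sum := by
  intro l
  induction l with
  | nil => simp
  | cons x l ih => by_cases hp : p x <;> simp [List.countP_cons, hp, ih] <;> omega

lemma countP_and_eq (j : Nat) (p : Nat → Bool) : ∀ (l : List Nat), l.Nodup →
    l.countP (fun c => p c && (j == c)) = if j ∈ l ∧ p j then 1 else 0 := by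
  intro l
  induction l with
  | nil => simp
  | cons x l ih =>
    intro hnd
    obtain ⟨hx, hnd'⟩ := List.nodup_cons.mp hnd
    by_cases hj : j = x
    · subst hj
      have h0 : l.countP (fun c => p c && (j == c)) = 0 := by
        rw [ih hnd']; simp [hx]
      by_cases hp : p j <;> simp [List.countP_cons, h0, hp]
    · have hne : (j == x) = false := by simp [hj]
      rw [List.countP_cons, ih hnd']
      simp [hne, hj]

lemma sum_map_split (f g : Nat → Nat) (i : Nat) : ∀ (l : List Nat), l.Nodup → i ∈ l →
    (∀ r ∈ l, r ≠ i → f r = g r) → g i = 0 → (l.map f).sum = f i + (l.map g).sum := by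
  intro l
  induction l with
  | nil => simp
  | cons x l ih =>
    intro hnd hi hfg hgi
    obtain ⟨hx, hnd'⟩ := List.nodup_cons.mp hnd
    by_cases hxi : x = i
    · subst hxi
      have : ∀ r ∈ l, f r = g r := fun r hr => hfg r (List.mem_cons_of_mem _ hr) (fun h => hx (h ▸ hr))
      have hmap : l.map f = l.map g := List.map_congr_left this
      simp [hmap, hgi]
    · have hi' : i ∈ l := by
        rcases List.mem_cons.mp hi with h | h
        · exact absurd h.symm hxi
        · exact h
      rw [List.map_cons, List.map_cons, List.sum_cons, List.sum_cons,
        ih hnd' hi' (fun r hr => hfg r (List.mem_cons_of_mem _ hr)) hgi,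
        hfg x (by simp) hxi]
      omega

lemma countP_cells (n : Nat) (p : Nat × Nat → Bool) :
    (cells n).countP p = ((List.range n).map (fun r => (List.range n).countP (fun c => p (r, c)))).sum := by
  simp only [cells, List.countP_flatMap]
  refine congrArg List.sum (List.map_congr_left ?_)
  intro r _
  show List.countP p (List.map (fun j => (r, j)) (List.range n)) = _
  rw [List.countP_map]
  rfl

lemma any_range_const_snd (n r : Nat) (hr : r < n) (t : Bool) :
    ((List.range n).any (fun k => (k == r) && t)) = t := by
  cases t
  · simp
  · simp only [Bool.and_true]
    simp [List.any_eq_true]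
    omega

lemma any_range_const_fst (n c : Nat) (hc : c < n) (t : Bool) :
    ((List.range n).any (fun k => t && (k == c))) = t := by
  cases t
  · simp
  · simp only [Bool.true_and]
    simp [List.any_eq_true]
    omega

lemma step_inv (m : List (List Int)) (n : Nat) (hlen : m.length = n)
    (hrow : ∀ r, r < n → n ≤ (m.getD r []).length)
    (P : List (Nat × Nat)) (s : List (List Int) × Int) (hInv : MarkInv m n P s)
    (i j : Nat) (hi : i < n) (hj : j < n) :
    MarkInv m n (P ++ [(i, j)]) (stepF n s (i, j)) := by
  obtain ⟨hL, hR, hChar, hCnt⟩ := hInv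
  by_cases hz : getM m i j = 0
  case neg =>
    have hsij : getM s.1 i j ≠ 0 := by
      rw [hChar i j hi hj]
      by_cases hm : markedB m P i j <;> simp [hm, hz]
    have hstep : stepF n s (i, j) = s := by simp [stepF, hsij]
    rw [hstep]
    have h0 : ((getM m i j == 0) : Bool) = false := beq_eq_false_iff_ne.mpr hz
    have hmeq : ∀ r c, markedB m (P ++ [(i, j)]) r c = markedB m P r c := by
      intro r c
      simp [markedB, List.any_append, zB, h0]
    refine ⟨hL, hR, fun r c hr hc => by rw [hmeq r c]; exact hChar r c hr hc, ?_⟩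
    rw [hCnt]
    congr 1
    exact (List.countP_congr (fun q _ => by rw [hmeq q.1 q.2])).symm
  case pos =>
    have hmij : markedB m P i j = false := by simp [markedB, hz]
    have hsij : getM s.1 i j = 0 := by rw [hChar i j hi hj, hmij]; simpa using hz
    have hstep : stepF n s (i, j) =
        (List.range n).foldl (passF (fun k => k) (fun _ => j))
          ((List.range n).foldl (passF (fun _ => i) (fun k => k)) s) := by
      simp [stepF, hsij]
    have hrowlen : ∀ r, r < n → n ≤ (s.1.getD r []).length := by
      intro r hr
      rw [hR r]
      exact hrow r hr
    have hposR : ∀ k ∈ List.range n,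
        (fun _ => i) k < s.1.length ∧ (fun k => k) k < (s.1.getD ((fun _ => i) k) []).length := by
      intro k hk
      refine ⟨by rw [hL, hlen]; exact hi, ?_⟩
      exact lt_of_lt_of_le (List.mem_range.mp hk) (hrowlen i hi)
    have RC := pass_char (fun _ => i) (fun k => k) (List.range n) s hposR
      (by
        refine List.Nodup.map ?_ (List.nodup_range)
        intro x y h
        simpa using h)
    set s₁ := (List.range n).foldl (passF (fun _ => i) (fun k => k)) s with hs₁
    have hposC : ∀ k ∈ List.range n,
        (fun k => k) k < s₁.1.length ∧ (fun _ => j) k < (s₁.1.getD ((fun k => k) k) []).length := by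
      intro k hk
      refine ⟨by rw [RC.1, hL, hlen]; exact List.mem_range.mp hk, ?_⟩
      rw [RC.2.1]
      exact lt_of_lt_of_le hj (hrowlen k (List.mem_range.mp hk))
    have CC := pass_char (fun k => k) (fun _ => j) (List.range n) s₁ hposC
      (by
        refine List.Nodup.map ?_ (List.nodup_range)
        intro x y h
        simpa using h)
    set s₂ := (List.range n).foldl (passF (fun k => k) (fun _ => j)) s₁ with hs₂
    rw [hstep]
    have hm' : ∀ r c, markedB m (P ++ [(i, j)]) r c =
        (markedB m P r c || (getM m r c == 1 && ((i == r) || (j == c)))) := by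
      intro r c
      simp [markedB, List.any_append, zB, hz, Bool.and_or_distrib_left]
    -- the value of s₁ at any in-range cell, in terms of the original matrix
    have hchar1 : ∀ r c, r < n → c < n → getM s₁.1 r c =
        if (markedB m P r c || (getM m r c == 1 && (i == r))) then -1 else getM m r c := by
      intro r c hr hc
      rw [RC.2.2.1 r c, any_range_const_fst n c hc, hChar r c hr hc]
      by_cases hmp : markedB m P r c <;> by_cases hir : i = r <;>
        by_cases hg : getM m r c = 1 <;> simp [hmp, hir, hg]
    refine ⟨CC.1.trans (RC.1.trans hL), fun r => (CC.2.1 r).trans ((RC.2.1 r).trans (hR r)), ?_, ?_⟩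
    · intro r c hr hc
      rw [CC.2.2.1 r c, any_range_const_snd n r hr, hchar1 r c hr hc, hm' r c]
      by_cases hmp : markedB m P r c <;> by_cases hir : i = r <;> by_cases hjc : j = c <;>
        by_cases hg : getM m r c = 1 <;> simp [hmp, hir, hjc, hg]
    · -- the counter bookkeeping
      have hcntRow : (List.range n).countP (fun k => getM s.1 i k == 1)
          = (List.range n).countP (fun k => !(markedB m P i k) && (getM m i k == 1)) := by
        apply List.countP_congr
        intro k hk
        rw [hChar i k hi (List.mem_range.mp hk)]
        by_cases hmp : markedB m P i k <;> by_cases hg : getM m i k = 1 <;> simp [hmp, hg]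
      have hcntCol : (List.range n).countP (fun k => getM s₁.1 k j == 1)
          = (List.range n).countP (fun k => !(markedB m P k j) && (getM m k j == 1)) := by
        apply List.countP_congr
        intro k hk
        rw [hchar1 k j (List.mem_range.mp hk) hj]
        by_cases hmp : markedB m P k j <;> by_cases hir : i = k <;>
          by_cases hg : getM m k j = 1 <;> simp [hmp, hir, hg] <;> simp_all
      rw [CC.2.2.2, RC.2.2.2, hCnt, hcntRow, hcntCol]
      have key : (cells n).countP (fun q => markedB m (P ++ [(i, j)]) q.1 q.2)
          = (cells n).countP (fun q => markedB m P q.1 q.2)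
            + (List.range n).countP (fun k => !(markedB m P i k) && (getM m i k == 1))
            + (List.range n).countP (fun k => !(markedB m P k j) && (getM m k j == 1)) := by
        have h1 : (cells n).countP (fun q => markedB m (P ++ [(i, j)]) q.1 q.2)
            = (cells n).countP (fun q => markedB m P q.1 q.2)
              + (cells n).countP (fun q => !(markedB m P q.1 q.2)
                  && (getM m q.1 q.2 == 1 && ((i == q.1) || (j == q.2)))) := by
          rw [← countP_or]
          exact List.countP_congr (fun q _ => by rw [hm' q.1 q.2])
        have hfi : (List.range n).countP
            (fun c => !(markedB m P i c) && (getM m i c == 1 && ((i == i) || (j == c))))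
            = (List.range n).countP (fun k => !(markedB m P i k) && (getM m i k == 1)) := by
          apply List.countP_congr
          intro c _
          simp
        have hgsum : ((List.range n).map
              (fun r => if (!(markedB m P r j) && (getM m r j == 1)) = true then 1 else 0)).sum
            = (List.range n).countP (fun k => !(markedB m P k j) && (getM m k j == 1)) :=
          (countP_sum _ _).symm
        have hfg : ∀ r ∈ List.range n, r ≠ i →
            (List.range n).countP
              (fun c => !(markedB m P r c) && (getM m r c == 1 && ((i == r) || (j == c))))
            = if (!(markedB m P r j) && (getM m r j == 1)) = true then 1 else 0 := by
          intro r _ hri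
          have hri' : ¬ (i = r) := fun h => hri h.symm
          have hir : ((i == r) : Bool) = false := by simp [hri']
          rw [show (fun c => !(markedB m P r c) && (getM m r c == 1 && ((i == r) || (j == c))))
              = (fun c => (!(markedB m P r c) && (getM m r c == 1)) && (j == c)) from by
            funext c
            simp [hir, Bool.and_assoc]]
          rw [countP_and_eq j _ (List.range n) List.nodup_range]
          simp [List.mem_range, hj]
        have hgi : (if (!(markedB m P i j) && (getM m i j == 1)) = true then 1 else 0) = 0 := by
          simp [hz]
        have hsplit := sum_map_split
          (fun r => (List.range n).countP
            (fun c => !(markedB m P r c) && (getM m r c == 1 && ((i == r) || (j == c)))))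
          (fun r => if (!(markedB m P r j) && (getM m r j == 1)) = true then 1 else 0)
          i (List.range n) List.nodup_range (List.mem_range.mpr hi) hfg hgi
        rw [hgsum] at hsplit
        simp only [hfi] at hsplit
        have h2 : (cells n).countP (fun q => !(markedB m P q.1 q.2)
              && (getM m q.1 q.2 == 1 && ((i == q.1) || (j == q.2))))
            = (List.range n).countP (fun k => !(markedB m P i k) && (getM m i k == 1))
              + (List.range n).countP (fun k => !(markedB m P k j) && (getM m k j == 1)) := by
          rw [countP_cells]
          exact hsplit
        rw [h1, h2]
        omega
      rw [key]
      push_cast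
      ring


lemma fold_inv (m : List (List Int)) (n : Nat) (hlen : m.length = n)
    (hrow : ∀ r, r < n → n ≤ (m.getD r []).length) :
    ∀ (L : List (Nat × Nat)) (P : List (Nat × Nat)) (s : List (List Int) × Int),
      (∀ q ∈ L, q.1 < n ∧ q.2 < n) → MarkInv m n P s →
      MarkInv m n (P ++ L) (L.foldl (stepF n) s) := by
  intro L
  induction L with
  | nil => intro P s _ h; simpa using h
  | cons q L ih =>
    intro P s hL h
    have h1 := step_inv m n hlen hrow P s h q.1 q.2 (hL q (by simp)).1 (hL q (by simp)).2
    have h2 := ih (P ++ [(q.1, q.2)]) (stepF n s (q.1, q.2))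
      (fun p hp => hL p (by simp [hp])) h1
    simpa [List.append_assoc] using h2

-- nested double fold = fold over the flattened list of index pairs
lemma foldl_pairs {α : Type} (f : α → Nat → Nat → α) (l₁ l₂ : List Nat) (init : α) :
    l₁.foldl (fun s i => l₂.foldl (fun s j => f s i j) s) init
      = (l₁.flatMap (fun i => l₂.map (fun j => (i, j)))).foldl (fun s q => f s q.1 q.2) init := by
  induction l₁ generalizing init with
  | nil => rfl
  | cons i l₁ ih => simp [List.flatMap_cons, List.foldl_append, List.foldl_map, ih]

lemma foldl_count {β : Type} (p : β → Bool) (l : List β) (c : Int) :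
    l.foldl (fun c x => if p x then c + 1 else c) c = c + (l.countP p : Int) := by
  induction l generalizing c with
  | nil => simp
  | cons x l ih =>
    by_cases h : p x <;> simp [List.countP_cons, h, ih] <;> push_cast <;> ring

lemma getD_map_range {α : Type} (f : Nat → α) (n i : Nat) (hi : i < n) (d : α) :
    ((List.range n).map f).getD i d = f i := by
  simp [List.getD_eq_getElem?_getD, List.getElem?_map, List.getElem?_range hi]

-- after the whole double loop every zero has been processed: "marked" = "shares a row or column with a zero"
lemma marked_full (m : List (List Int)) (n r c : Nat) (hr : r < n) (hc : c < n) :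
    markedB m (cells n) r c = (getM m r c == 1 &&
      (((List.range n).any (fun b => getM m r b == 0)) ||
       ((List.range n).any (fun a => getM m a c == 0)))) := by
  unfold markedB
  congr 1
  rw [Bool.eq_iff_iff]
  simp only [List.any_eq_true, Bool.and_eq_true, Bool.or_eq_true, beq_iff_eq, zB, List.mem_range]
  constructor
  · rintro ⟨p, hp, hz0, hor⟩
    obtain ⟨h1, h2⟩ := mem_cells.mp hp
    rcases hor with h | h
    · exact Or.inl ⟨p.2, h2, by rw [← h]; exact hz0⟩
    · exact Or.inr ⟨p.1, h1, by rw [← h]; exact hz0⟩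
  · rintro (⟨b, hb, hz0⟩ | ⟨a, ha, hz0⟩)
    · exact ⟨(r, b), mem_cells.mpr ⟨hr, hb⟩, hz0, Or.inl rfl⟩
    · exact ⟨(a, c), mem_cells.mpr ⟨ha, hc⟩, hz0, Or.inr rfl⟩

-- ===== VERDICT (by name: the statement is the Claim_ definition above) =====
theorem count_flipped_bits_spec : Claim_equal_count_flipped_bits := by
  unfold Claim_equal_count_flipped_bits
  intro matrix _ hpre
  unfold Spec_count_flipped_bits
  have hrow : ∀ r, r < matrix.length → matrix.length ≤ (matrix.getD r []).length := by
    intro r hr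
    have hmem : matrix.getD r [] ∈ matrix := by
      have h : matrix.getD r [] = matrix[r] := by
        simp [List.getD_eq_getElem?_getD, List.getElem?_eq_getElem hr]
      rw [h]
      exact List.getElem_mem _
    exact hpre _ hmem
  -- A's nested double loop, flattened to a fold over the cell list
  have hA : count_flipped_bits matrix
      = ((cells matrix.length).foldl (stepF matrix.length) (matrix, (0 : Int))).2 := by
    show ((List.range matrix.length).foldl (fun s i =>
      (List.range matrix.length).foldl (fun s j => stepF matrix.length s (i, j)) s)
        (matrix, (0 : Int))).2 = _
    rw [foldl_pairs (fun s i j => stepF matrix.length s (i, j))]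
    rfl
  have hInv0 : MarkInv matrix matrix.length [] (matrix, (0 : Int)) := by
    exact ⟨rfl, fun r => rfl, fun r c _ _ => by simp [markedB], by simp [markedB]⟩
  have hfin := fold_inv matrix matrix.length rfl hrow (cells matrix.length) []
    (matrix, (0 : Int)) (fun q hq => mem_cells.mp hq) hInv0
  rw [List.nil_append] at hfin
  rw [hA, hfin.2.2.2]
  -- B's two-pass count, as a countP over the same cell list
  have hB : count_flipped_bits_alt matrix
      = (0 : Int) + (((cells matrix.length).countP (fun q => getM matrix q.1 q.2 == 1 &&
          ((((List.range matrix.length).map (fun i => (List.range matrix.length).any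
              (fun j => getM matrix i j == 0))).getD q.1 false) ||
           (((List.range matrix.length).map (fun j => (List.range matrix.length).any
              (fun i => getM matrix i j == 0))).getD q.2 false)))) : Nat) := by
    show (List.range matrix.length).foldl (fun count i =>
      (List.range matrix.length).foldl (fun count j =>
        if getM matrix i j == 1 &&
            ((((List.range matrix.length).map (fun i => (List.range matrix.length).any
                (fun j => getM matrix i j == 0))).getD i false) ||
             (((List.range matrix.length).map (fun j => (List.range matrix.length).any
                (fun i => getM matrix i j == 0))).getD j false))
        then count + 1 else count) count) (0 : Int) = _
    rw [foldl_pairs (fun (c : Int) i j => if getM matrix i j == 1 &&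
          ((((List.range matrix.length).map (fun i => (List.range matrix.length).any
              (fun j => getM matrix i j == 0))).getD i false) ||
           (((List.range matrix.length).map (fun j => (List.range matrix.length).any
              (fun i => getM matrix i j == 0))).getD j false)) then c + 1 else c)]
    exact foldl_count _ _ _
  rw [hB]
  have hcnt : (cells matrix.length).countP
        (fun q => markedB matrix (cells matrix.length) q.1 q.2)
      = (cells matrix.length).countP (fun q => getM matrix q.1 q.2 == 1 &&
          ((((List.range matrix.length).map (fun i => (List.range matrix.length).any
              (fun j => getM matrix i j == 0))).getD q.1 false) ||
           (((List.range matrix.length).map (fun j => (List.range matrix.length).any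
              (fun i => getM matrix i j == 0))).getD q.2 false))) := by
    apply List.countP_congr
    intro q hq
    obtain ⟨h1, h2⟩ := mem_cells.mp hq
    rw [marked_full matrix matrix.length q.1 q.2 h1 h2,
      getD_map_range _ _ _ h1, getD_map_range _ _ _ h2]
  rw [hcnt]
  omega
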